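-- pv_equiv track=rewrite | github.com/CodeAlive-AI/fpf-problem-solving-skill | scripts/split_spec.py | fold_wrappers
-- ===== SOURCE A (Python) =====
-- def is_empty_wrapper(h_idx: int, headings: list, lines: list[str]) -> bool:
--     """An H1 is an empty wrapper if its block contains only blank lines
--     and it is immediately followed by another H1."""
--     line_num, level, _ = headings[h_idx]
--     if level != 1 or h_idx + 1 >= len(headings):
--         return False
--     next_line, next_level, _ = headings[h_idx + 1]
--     if next_level != 1:
--         return False
--     return all(not line.strip() for line in lines[line_num + 1 : next_line])
--
-- def fold_wrappers(headings: list, lines: list[str]) -> list: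
--     """Rule B: empty H1 wrappers fold into the next H1.
--     The wrapper's title is kept (canonical Part name) and its line number
--     becomes the merged section's effective start, so the wrapper heading
--     appears in the resulting preamble."""
--     folded = []
--     pending_start = None
--     pending_title = None
--     for idx, (line_num, level, title) in enumerate(headings):
--         if is_empty_wrapper(idx, headings, lines):
--             if pending_start is None:
--                 pending_start = line_num
--                 pending_title = title
--             continue
--         if level == 1 and pending_start is not None:
--             folded.append((pending_start, level, pending_title))
--             pending_start = None
--             pending_title = None
--         else:
--             folded.append((line_num, level, title))
--     return folded
-- ===== SOURCE B (Python) =====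
-- def is_empty_wrapper(h_idx: int, headings: list, lines: list[str]) -> bool:
--     """An H1 is an empty wrapper if its block contains only blank lines
--     and it is immediately followed by another H1."""
--     line_num, level, _ = headings[h_idx]
--     if level != 1 or h_idx + 1 >= len(headings):
--         return False
--     next_line, next_level, _ = headings[h_idx + 1]
--     if next_level != 1:
--         return False
--     return all(not line.strip() for line in lines[line_num + 1 : next_line])
--
-- def fold_wrappers(headings: list, lines: list[str]) -> list:
--     """Rule B via an index-based while loop: on the first wrapper of a run,
--     remember its start and title, consume the whole run with an inner loop,
--     then emit one merged heading at the fold-target H1."""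
--     folded = []
--     i = 0
--     n = len(headings)
--     while i < n:
--         if is_empty_wrapper(i, headings, lines):
--             start, _, title = headings[i]
--             while is_empty_wrapper(i, headings, lines):
--                 i += 1
--             folded.append((start, headings[i][1], title))
--             i += 1
--         else:
--             folded.append(headings[i])
--             i += 1
--     return folded
-- ===== Notes on version B (the rewrite author's own statement) =====
-- stated objective: alternative
-- what changed: Replaces the stateful pending_start/pending_title flag scan with an index-based while loop that consumes each whole wrapper run with an inner loop and emits the merged heading at the fold-target H1 directly.
import Mathlib
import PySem

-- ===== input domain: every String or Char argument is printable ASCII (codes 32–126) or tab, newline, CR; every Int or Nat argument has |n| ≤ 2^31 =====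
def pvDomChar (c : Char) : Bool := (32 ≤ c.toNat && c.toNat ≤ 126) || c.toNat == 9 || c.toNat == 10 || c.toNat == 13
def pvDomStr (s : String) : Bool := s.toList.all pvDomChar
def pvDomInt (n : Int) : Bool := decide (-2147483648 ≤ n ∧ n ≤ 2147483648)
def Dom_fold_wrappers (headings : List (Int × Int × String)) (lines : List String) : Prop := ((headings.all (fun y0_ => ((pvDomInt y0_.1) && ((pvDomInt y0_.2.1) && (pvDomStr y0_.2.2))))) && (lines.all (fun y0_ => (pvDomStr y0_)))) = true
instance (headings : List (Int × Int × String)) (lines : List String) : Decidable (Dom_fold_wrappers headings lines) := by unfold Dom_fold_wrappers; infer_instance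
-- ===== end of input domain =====

-- B replaces A's stateful pending-flag scan with an index-based while loop that
-- consumes each wrapper run with an inner loop (objective: alternative decomposition).

-- ===== PORT A =====
-- shared helper (identical in Source A and Source B): is_empty_wrapper
def is_empty_wrapper (h_idx : Int) (headings : List (Int × Int × String)) (lines : List String) : Bool :=
  match PySem.List.pyGet? headings h_idx with
  | none => false  -- unreachable: every call site indexes in range
  | some (line_num, level, _) =>
    if level ≠ 1 ∨ (headings.length : Int) ≤ h_idx + 1 then false
    else
      match PySem.List.pyGet? headings (h_idx + 1) with
      | none => false  -- unreachable: the length check above guarantees the index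
      | some (_next_line, next_level, _) =>
        if next_level ≠ 1 then false
        else (PySem.List.slice lines (some (line_num + 1)) (some _next_line)).all
              (fun line => PySem.Str.strip line == "")

-- the body of A's for-loop, over state (folded, pending_start/pending_title as one Option)
def foldStepA (headings : List (Int × Int × String)) (lines : List String)
    (st : List (Int × Int × String) × Option (Int × String))
    (p : Int × (Int × Int × String)) : List (Int × Int × String) × Option (Int × String) :=
  let idx := p.1
  let line_num := p.2.1
  let level := p.2.2.1
  let title := p.2.2.2
  if is_empty_wrapper idx headings lines then
    match st.2 with
    | none => (st.1, some (line_num, title))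
    | some _ => st
  else
    match st.2 with
    | some q => if level = 1 then (st.1 ++ [(q.1, level, q.2)], none)
                else (st.1 ++ [(line_num, level, title)], st.2)
    | none => (st.1 ++ [(line_num, level, title)], st.2)

def fold_wrappers (headings : List (Int × Int × String)) (lines : List String) : List (Int × Int × String) :=
  (List.foldl (foldStepA headings lines) ([], none) (PySem.List.enumerate headings 0)).1

-- ===== PORT B =====
-- termination facts for B's while loops (cited by name in decreasing_by)
theorem wrapper_succ_lt (headings : List (Int × Int × String)) (lines : List String) (i : Nat)
    (hw : is_empty_wrapper (i : Int) headings lines = true) : i + 1 < headings.length := by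
  unfold is_empty_wrapper at hw
  rcases h : PySem.List.pyGet? headings (i : Int) with _ | x
  · simp [h] at hw
  · rw [h] at hw
    obtain ⟨ln, lv, t⟩ := x
    simp only at hw
    split at hw
    · simp at hw
    · omega

-- inner `while is_empty_wrapper(i, headings, lines): i += 1`
def skipW (headings : List (Int × Int × String)) (lines : List String) (i : Nat) : Nat :=
  if is_empty_wrapper (i : Int) headings lines then skipW headings lines (i + 1) else i
termination_by headings.length - i
decreasing_by have := wrapper_succ_lt headings lines i (by assumption); omega

theorem le_skipW (headings : List (Int × Int × String)) (lines : List String) (i : Nat) :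
    i ≤ skipW headings lines i := by
  fun_induction skipW headings lines i with
  | case1 i hw ih => omega
  | case2 i hw => omega

-- outer while loop of B
def loopB (headings : List (Int × Int × String)) (lines : List String)
    (i : Nat) (acc : List (Int × Int × String)) : List (Int × Int × String) :=
  if h : i < headings.length then
    if hw : is_empty_wrapper (i : Int) headings lines = true then
      let start := headings[i].1
      let title := headings[i].2.2
      let j := skipW headings lines i
      match PySem.List.pyGet? headings (j : Int) with
      | some (_, lvl, _) => loopB headings lines (j + 1) (acc ++ [(start, lvl, title)])
      | none => acc  -- unreachable: the heading after a wrapper run always exists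
    else loopB headings lines (i + 1) (acc ++ [headings[i]])
  else acc
termination_by headings.length - i
decreasing_by
  · have := le_skipW headings lines i; omega
  · omega

def fold_wrappers_alt (headings : List (Int × Int × String)) (lines : List String) : List (Int × Int × String) :=
  loopB headings lines 0 []

-- ===== PRECONDITION & SPEC =====
def Spec_fold_wrappers (headings : List (Int × Int × String)) (lines : List String) (out : List (Int × Int × String)) : Prop := out = fold_wrappers_alt headings lines
instance (headings : List (Int × Int × String)) (lines : List String) (out : List (Int × Int × String)) : Decidable (Spec_fold_wrappers headings lines out) := by unfold Spec_fold_wrappers; infer_instance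

-- ===== CLAIM (what is proved, stated in full; the proofs are below) =====
def Claim_equal_fold_wrappers : Prop := ∀ (headings : List (Int × Int × String)) (lines : List String), Dom_fold_wrappers headings lines → Spec_fold_wrappers headings lines (fold_wrappers headings lines)

-- ===== LEMMAS AND PROOFS =====

-- a true wrapper test at index i forces the next heading to be an H1
theorem wrapper_next_level (headings : List (Int × Int × String)) (lines : List String) (i : Nat)
    (hw : is_empty_wrapper (i : Int) headings lines = true) :
    (headings[i + 1]'(wrapper_succ_lt headings lines i hw)).2.1 = 1 := by
  have hlt := wrapper_succ_lt headings lines i hw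
  have h1 : PySem.List.pyGet? headings (i : Int) = some (headings[i]'(by omega)) := by
    rw [PySem.List.pyGet?_natCast, List.getElem?_eq_getElem (by omega)]
  have h2 : PySem.List.pyGet? headings ((i : Int) + 1) = some (headings[i + 1]'hlt) := by
    have hc : ((i : Int) + 1) = ((i + 1 : Nat) : Int) := by push_cast; ring
    rw [hc, PySem.List.pyGet?_natCast, List.getElem?_eq_getElem hlt]
  unfold is_empty_wrapper at hw
  rw [h1] at hw
  generalize hA : headings[i]'(by omega : i < headings.length) = a at hw
  obtain ⟨ln, lv, t⟩ := a
  simp only at hw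
  split at hw
  · simp at hw
  · rw [h2] at hw
    generalize hB : headings[i + 1]'hlt = b at hw ⊢
    obtain ⟨nl, nlv, nt⟩ := b
    simp only at hw
    split at hw
    next hne => simp at hw
    next hne => simpa using hne

theorem skipW_true (headings : List (Int × Int × String)) (lines : List String) (i : Nat)
    (hw : is_empty_wrapper (i : Int) headings lines = true) :
    skipW headings lines i = skipW headings lines (i + 1) := by
  rw [skipW]; simp [hw]

theorem skipW_false (headings : List (Int × Int × String)) (lines : List String) (i : Nat)
    (hw : ¬ is_empty_wrapper (i : Int) headings lines = true) :
    skipW headings lines i = i := by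
  rw [skipW]; simp [hw]

-- the inner loop of B, started just past a wrapper, stops at an in-range H1
theorem skipW_target (headings : List (Int × Int × String)) (lines : List String) :
    ∀ (m j : Nat), headings.length - j ≤ m →
    is_empty_wrapper (j : Int) headings lines = true →
    ∃ hs : skipW headings lines (j + 1) < headings.length,
      ¬ is_empty_wrapper ((skipW headings lines (j + 1) : Nat) : Int) headings lines = true ∧
      (headings[skipW headings lines (j + 1)]'hs).2.1 = 1 := by
  intro m
  induction m with
  | zero =>
    intro j hm hw
    have := wrapper_succ_lt headings lines j hw
    omega
  | succ m ih =>
    intro j hm hw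
    have hlt := wrapper_succ_lt headings lines j hw
    by_cases hwk : is_empty_wrapper ((j + 1 : Nat) : Int) headings lines = true
    · have := ih (j + 1) (by omega) hwk
      rwa [skipW_true headings lines (j + 1) hwk]
    · rw [skipW_false headings lines (j + 1) hwk]
      exact ⟨hlt, hwk, wrapper_next_level headings lines j hw⟩

-- A's loop over a run of wrappers with a pending value: the pending pair is
-- emitted (with level 1) exactly at the heading where B's inner skip loop stops
theorem pendLemma (headings : List (Int × Int × String)) (lines : List String) :
    ∀ (m j : Nat) (acc : List (Int × Int × String)) (p : Int × String),
    headings.length - j ≤ m →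
    is_empty_wrapper (j : Int) headings lines = true →
    List.foldl (foldStepA headings lines) (acc, some p)
      (PySem.List.enumerate (headings.drop (j + 1)) ((j + 1 : Nat) : Int))
    = List.foldl (foldStepA headings lines) (acc ++ [(p.1, 1, p.2)], none)
      (PySem.List.enumerate (headings.drop (skipW headings lines (j + 1) + 1))
        ((skipW headings lines (j + 1) + 1 : Nat) : Int)) := by
  intro m
  induction m with
  | zero =>
    intro j acc p hm hw
    have := wrapper_succ_lt headings lines j hw
    omega
  | succ m ih =>
    intro j acc p hm hw
    have hlt := wrapper_succ_lt headings lines j hw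
    have hdrop : headings.drop (j + 1) = headings[j + 1] :: headings.drop (j + 1 + 1) :=
      List.drop_eq_getElem_cons hlt
    rw [hdrop, PySem.List.enumerate_cons, List.foldl_cons]
    by_cases hwk : is_empty_wrapper ((j + 1 : Nat) : Int) headings lines = true
    · have hstep : foldStepA headings lines (acc, some p) (((j + 1 : Nat) : Int), headings[j + 1]) = (acc, some p) := by
        simp only [foldStepA, hwk]
        simp
      rw [hstep]
      have hcast : ((j + 1 : Nat) : Int) + 1 = ((j + 1 + 1 : Nat) : Int) := by push_cast; ring
      rw [hcast, skipW_true headings lines (j + 1) hwk]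
      exact ih (j + 1) acc p (by omega) hwk
    · have hlv : (headings[j + 1]'hlt).2.1 = 1 := wrapper_next_level headings lines j hw
      have hstep : foldStepA headings lines (acc, some p) (((j + 1 : Nat) : Int), headings[j + 1]) = (acc ++ [(p.1, 1, p.2)], none) := by
        simp only [foldStepA, hwk]
        simp [hlv]
      rw [hstep, skipW_false headings lines (j + 1) hwk]
      have hcast : ((j + 1 : Nat) : Int) + 1 = ((j + 1 + 1 : Nat) : Int) := by push_cast; ring
      rw [hcast]

-- A's fold from index i with no pending value equals B's outer loop from i
theorem mainLemma (headings : List (Int × Int × String)) (lines : List String) :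
    ∀ (m i : Nat) (acc : List (Int × Int × String)),
    headings.length - i ≤ m →
    (List.foldl (foldStepA headings lines) (acc, none)
      (PySem.List.enumerate (headings.drop i) ((i : Nat) : Int))).1
    = loopB headings lines i acc := by
  intro m
  induction m with
  | zero =>
    intro i acc hm
    have hge : headings.length ≤ i := by omega
    rw [List.drop_eq_nil_of_le hge, PySem.List.enumerate_nil, List.foldl_nil, loopB]
    rw [dif_neg (by omega)]
  | succ m ih =>
    intro i acc hm
    by_cases h : i < headings.length
    · have hdrop : headings.drop i = headings[i] :: headings.drop (i + 1) :=
        List.drop_eq_getElem_cons h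
      rw [hdrop, PySem.List.enumerate_cons, List.foldl_cons]
      have hcast : ((i : Nat) : Int) + 1 = ((i + 1 : Nat) : Int) := by push_cast; ring
      by_cases hw : is_empty_wrapper ((i : Nat) : Int) headings lines = true
      · have hstep : foldStepA headings lines (acc, none) (((i : Nat) : Int), headings[i]) = (acc, some ((headings[i]'h).1, (headings[i]'h).2.2)) := by
          simp only [foldStepA, hw]
          simp
        rw [hstep, hcast,
          pendLemma headings lines headings.length i acc ((headings[i]'h).1, (headings[i]'h).2.2) (by omega) hw]
        have hski := le_skipW headings lines (i + 1)
        obtain ⟨hs, hnw, hlv⟩ := skipW_target headings lines headings.length i (by omega) hw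
        rw [ih (skipW headings lines (i + 1) + 1) _ (by omega)]
        have hsome : PySem.List.pyGet? headings ((skipW headings lines (i + 1) : Nat) : Int)
            = some (headings[skipW headings lines (i + 1)]'hs) := by
          rw [PySem.List.pyGet?_natCast, List.getElem?_eq_getElem hs]
        conv_rhs => rw [loopB]
        rw [dif_pos h, dif_pos hw, skipW_true headings lines i hw]
        generalize hx : headings[skipW headings lines (i + 1)]'hs = x at hlv hsome
        obtain ⟨a, b, c⟩ := x
        simp only at hlv
        simp [hsome, hlv]
      · have hstep : foldStepA headings lines (acc, none) (((i : Nat) : Int), headings[i]) = (acc ++ [headings[i]'h], none) := by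
          simp only [foldStepA, hw]
          simp
        rw [hstep, hcast, ih (i + 1) _ (by omega)]
        conv_rhs => rw [loopB]
        rw [dif_pos h, dif_neg hw]
    · have hge : headings.length ≤ i := by omega
      rw [List.drop_eq_nil_of_le hge, PySem.List.enumerate_nil, List.foldl_nil, loopB]
      rw [dif_neg (by omega)]

-- ===== VERDICT =====
theorem fold_wrappers_spec : Claim_equal_fold_wrappers := by
  intro headings lines _
  unfold Spec_fold_wrappers fold_wrappers fold_wrappers_alt
  have := mainLemma headings lines headings.length 0 [] (by omega)
  simpa using this
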